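-- pv_equiv track=rewrite | github.com/HaoranMa1023/OASVD | core/metrics.py | detection_delays
-- ===== SOURCE A (Python) =====
-- from typing import Sequence, Mapping
--
-- def detection_delays(true_changes: Sequence[int],
--                      detected_changes: Sequence[int],
--                      T: int | None = None) -> list[int]:
--     """Compute detection delays for a set of true change-points.
--
--     For each true change time ``t*``, we look for the smallest detected time
--     ``t_det >= t*``.  The delay is ``t_det - t*``; if no such detection
--     exists, we optionally treat the delay as ``T - t*`` (if ``T`` is given),
--     or ignore it if ``T`` is None.
--
--     Parameters
--     ----------
--     true_changes : sequence of int
--         Ground-truth change times (e.g. shock times t*).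
--     detected_changes : sequence of int
--         Times at which the algorithm raises a change / probe alarm.
--     T : int, optional
--         Total length of the time series.  If provided, missing detections
--         contribute a delay of ``T - t*``; if None, missing detections are
--         skipped.
--
--     Returns
--     -------
--     delays : list of int
--         Detection delays for each true change (in the same order).
--     """
--     det = sorted(detected_changes)
--     delays: list[int] = []
--     for t_star in true_changes:
--         # first detected time >= t_star
--         t_det = next((t for t in det if t >= t_star), None)
--         if t_det is None:
--             if T is not None:
--                 delays.append(int(T - t_star))
--             # if T is None, we simply skip this change
--         else:
--             delays.append(int(t_det - t_star))
--     return delays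
-- ===== SOURCE B (Python) =====
-- from typing import Sequence
--
-- def _bisect_left(xs, x):
--     """Index of first element >= x in the sorted list xs (hand-rolled bisect_left)."""
--     lo, hi = 0, len(xs)
--     while lo < hi:
--         mid = (lo + hi) // 2
--         if xs[mid] < x:
--             lo = mid + 1
--         else:
--             hi = mid
--     return lo
--
--
-- def detection_delays(true_changes: Sequence[int],
--                      detected_changes: Sequence[int],
--                      T: int | None = None) -> list[int]:
--     det = sorted(detected_changes)
--     n = len(det)
--     delays: list[int] = []
--     for t_star in true_changes:
--         i = _bisect_left(det, t_star)
--         if i < n: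
--             delays.append(det[i] - t_star)
--         elif T is not None:
--             delays.append(T - t_star)
--     return delays
-- ===== Notes on version B (the rewrite author's own statement) =====
-- stated objective: faster
-- what changed: Replaces the per-change linear scan of the sorted detections with a binary search (hand-rolled bisect_left), so each true change costs O(log m) instead of O(m).
import Mathlib
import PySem

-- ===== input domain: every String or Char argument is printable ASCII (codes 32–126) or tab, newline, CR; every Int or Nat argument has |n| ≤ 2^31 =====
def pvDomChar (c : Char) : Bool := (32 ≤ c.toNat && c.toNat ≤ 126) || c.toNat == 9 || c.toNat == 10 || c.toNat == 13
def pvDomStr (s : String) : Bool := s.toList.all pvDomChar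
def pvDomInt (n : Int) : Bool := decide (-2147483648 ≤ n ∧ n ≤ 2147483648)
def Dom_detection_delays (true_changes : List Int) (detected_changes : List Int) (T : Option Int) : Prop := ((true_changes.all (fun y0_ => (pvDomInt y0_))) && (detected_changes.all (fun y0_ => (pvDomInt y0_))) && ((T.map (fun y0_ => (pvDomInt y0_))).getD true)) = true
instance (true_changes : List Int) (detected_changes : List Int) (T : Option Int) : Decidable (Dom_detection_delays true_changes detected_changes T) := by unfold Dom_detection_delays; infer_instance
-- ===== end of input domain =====

-- B replaces A's per-change linear scan of the sorted detections with a binary search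
-- (hand-rolled bisect_left): objective faster.


-- ===== PORT A =====
-- det = sorted(detected_changes); for each t_star: linear scan for the first t in det
-- with t >= t_star (next(... )); append t_det - t_star, else T - t_star if T given.
def detection_delays (true_changes : List Int) (detected_changes : List Int) (T : Option Int) : List Int :=
  let det := PySem.List.sorted detected_changes (fun x => x) false
  true_changes.foldl (fun delays t_star =>
    match det.find? (fun t => decide (t ≥ t_star)) with
    | none =>
        match T with
        | some Tv => delays ++ [Tv - t_star]
        | none => delays
    | some t_det => delays ++ [t_det - t_star]) []

-- ===== PORT B =====
-- hand-rolled bisect_left: the while lo < hi loop of Source B; xs[mid] is always in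
-- range (lo ≤ mid < hi ≤ len), so List.getD is exact here.
def bLeft (xs : List Int) (x : Int) (lo hi : Nat) : Nat :=
  if _h : lo < hi then
    let mid := (lo + hi) / 2
    if xs.getD mid 0 < x then bLeft xs x (mid + 1) hi else bLeft xs x lo mid
  else lo
termination_by hi - lo
decreasing_by all_goals omega

def detection_delays_alt (true_changes : List Int) (detected_changes : List Int) (T : Option Int) : List Int :=
  let det := PySem.List.sorted detected_changes (fun x => x) false
  let n := det.length
  true_changes.foldl (fun delays t_star =>
    let i := bLeft det t_star 0 n
    if h : i < n then delays ++ [det[i] - t_star]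
    else
      match T with
      | some Tv => delays ++ [Tv - t_star]
      | none => delays) []

-- ===== PRECONDITION & SPEC =====
def Spec_detection_delays (true_changes : List Int) (detected_changes : List Int) (T : Option Int) (out : List Int) : Prop := out = detection_delays_alt true_changes detected_changes T
instance (true_changes : List Int) (detected_changes : List Int) (T : Option Int) (out : List Int) : Decidable (Spec_detection_delays true_changes detected_changes T out) := by unfold Spec_detection_delays; infer_instance

-- ===== CLAIM (what is proved, stated in full; the proofs are below) =====
def Claim_equal_detection_delays : Prop := ∀ (true_changes : List Int) (detected_changes : List Int) (T : Option Int), Dom_detection_delays true_changes detected_changes T → Spec_detection_delays true_changes detected_changes T (detection_delays true_changes detected_changes T)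

-- ===== LEMMAS AND PROOFS =====

-- bLeft on a (weakly) monotone list splits it: everything below the result is < x,
-- everything from the result on is ≥ x.
theorem bLeft_spec (xs : List Int) (x : Int)
    (hmono : ∀ p q : Nat, (hpq : p ≤ q) → (hq : q < xs.length) → xs[p]'(by omega) ≤ xs[q]) :
    ∀ n lo hi, hi - lo = n → lo ≤ hi → hi ≤ xs.length →
    (∀ j : Nat, j < lo → (hj : j < xs.length) → xs[j] < x) →
    (∀ j : Nat, hi ≤ j → (hj : j < xs.length) → x ≤ xs[j]) →
    bLeft xs x lo hi ≤ xs.length ∧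
    (∀ j : Nat, j < bLeft xs x lo hi → (hj : j < xs.length) → xs[j] < x) ∧
    (∀ j : Nat, bLeft xs x lo hi ≤ j → (hj : j < xs.length) → x ≤ xs[j]) := by
  intro n
  induction n using Nat.strong_induction_on with
  | _ n ih =>
    intro lo hi hn hlh hhi hlow hhigh
    rw [bLeft]
    by_cases h : lo < hi
    · rw [dif_pos h]
      have hmidlt : (lo + hi) / 2 < xs.length := by omega
      have hgetD : xs.getD ((lo + hi) / 2) 0 = xs[(lo + hi) / 2] := by
        simp [List.getD_eq_getElem?_getD, List.getElem?_eq_getElem hmidlt]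
      simp only [hgetD]
      by_cases hc : xs[(lo + hi) / 2] < x
      · rw [if_pos hc]
        exact ih (hi - ((lo + hi) / 2 + 1)) (by omega) ((lo + hi) / 2 + 1) hi rfl
          (by omega) hhi
          (fun j hj hjl => lt_of_le_of_lt (hmono j ((lo + hi) / 2) (by omega) hmidlt) hc)
          hhigh
      · rw [if_neg hc]
        push Not at hc
        exact ih ((lo + hi) / 2 - lo) (by omega) lo ((lo + hi) / 2) rfl
          (by omega) (by omega) hlow
          (fun j hj hjl => le_trans hc (hmono ((lo + hi) / 2) j hj hjl))
    · rw [dif_neg h]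
      exact ⟨by omega, fun j hj hjl => hlow j (by omega) hjl,
        fun j hj hjl => hhigh j (by omega) hjl⟩

-- find? on a list whose first k elements falsify p and whose remainder satisfies p
-- is the k-th element (none exactly when k = length).
theorem find?_of_split (xs : List Int) (p : Int → Bool) :
    ∀ k : Nat, k ≤ xs.length →
    (∀ j : Nat, j < k → (hj : j < xs.length) → p xs[j] = false) →
    (∀ j : Nat, k ≤ j → (hj : j < xs.length) → p xs[j] = true) →
    xs.find? p = xs[k]? := by
  induction xs with
  | nil => intro k _ _ _; simp
  | cons a t iht =>
    intro k hk hlt hge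
    cases k with
    | zero =>
      have := hge 0 (Nat.zero_le _) (by simp)
      simp at this
      simp [List.find?, this]
    | succ k' =>
      have h0 := hlt 0 (Nat.succ_pos _) (by simp)
      simp at h0
      simp only [List.find?, h0, List.getElem?_cons_succ]
      exact iht k' (by simpa using hk)
        (fun j hj hjl => by simpa using hlt (j + 1) (by omega) (by simpa using hjl))
        (fun j hj hjl => by simpa using hge (j + 1) (by omega) (by simpa using hjl))

-- the two per-element step functions coincide
theorem step_eq (detected_changes : List Int) (T : Option Int) :
    (fun (delays : List Int) (t_star : Int) =>
      match (PySem.List.sorted detected_changes (fun x => x) false).find?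
          (fun t => decide (t ≥ t_star)) with
      | none =>
          match T with
          | some Tv => delays ++ [Tv - t_star]
          | none => delays
      | some t_det => delays ++ [t_det - t_star]) =
    (fun (delays : List Int) (t_star : Int) =>
      if h : bLeft (PySem.List.sorted detected_changes (fun x => x) false) t_star 0
          (PySem.List.sorted detected_changes (fun x => x) false).length <
          (PySem.List.sorted detected_changes (fun x => x) false).length then
        delays ++ [(PySem.List.sorted detected_changes (fun x => x) false)[bLeft
          (PySem.List.sorted detected_changes (fun x => x) false) t_star 0
          (PySem.List.sorted detected_changes (fun x => x) false).length]'h - t_star]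
      else
        match T with
        | some Tv => delays ++ [Tv - t_star]
        | none => delays) := by
  funext delays t_star
  set det := PySem.List.sorted detected_changes (fun x => x) false with hdet
  have hmono : ∀ p q : Nat, (hpq : p ≤ q) → (hq : q < det.length) → det[p]'(by omega) ≤ det[q] :=
    fun p q hpq hq => PySem.List.sorted_id_getElem_mono detected_changes hpq hq
  obtain ⟨hle, hlt, hge⟩ := bLeft_spec det t_star hmono (det.length - 0) 0 det.length rfl
    (Nat.zero_le _) le_rfl (by omega) (fun j hj hjl => by omega)
  have hfind : det.find? (fun t => decide (t ≥ t_star)) = det[bLeft det t_star 0 det.length]? := by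
    apply find?_of_split det _ _ hle
    · intro j hj hjl; simpa using not_le.mpr (hlt j hj hjl)
    · intro j hj hjl; simpa using hge j hj hjl
  by_cases h : bLeft det t_star 0 det.length < det.length
  · simp [hfind, h]
  · have : det[bLeft det t_star 0 det.length]? = none := by
      simp [List.getElem?_eq_none_iff]; omega
    simp [hfind, this, h]

-- ===== VERDICT (by name: the statement is the Claim_ definition above) =====
theorem detection_delays_spec : Claim_equal_detection_delays := by
  intro true_changes detected_changes T _
  show detection_delays true_changes detected_changes T
      = detection_delays_alt true_changes detected_changes T
  simp only [detection_delays, detection_delays_alt]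
  rw [step_eq detected_changes T]
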